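-- pv_equiv track=rewrite | github.com/kadirhanpolat/pytop | src/pytop/invariants.py | _local_character
-- ===== SOURCE A (Python) =====
-- from itertools import combinations
-- from typing import Any, Iterable
--
-- def _local_character(point: Any, opens: list[set[Any]]) -> int:
--     neighborhoods = [U for U in opens if point in U]
--     if not neighborhoods:
--         return 0
--     for size in range(1, len(neighborhoods) + 1):
--         for family in combinations(neighborhoods, size):
--             if all(any(point in V and V.issubset(U) for V in family) for U in neighborhoods):
--                 return size
--     return len(neighborhoods)
-- ===== SOURCE B (Python) =====
-- def _local_character(point, opens):
--     neighborhoods = [U for U in opens if point in U]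
--     distinct_minimal = []
--     for U in neighborhoods:
--         if any(V < U for V in neighborhoods):
--             continue  # U is not minimal
--         if any(W == U for W in distinct_minimal):
--             continue  # this minimal set already counted
--         distinct_minimal.append(U)
--     return len(distinct_minimal)
-- ===== Notes on version B (the rewrite author's own statement) =====
-- stated objective: alternative
-- what changed: Instead of enumerating families (combinations of every size) and returning the first covering size, B counts the distinct minimal neighborhoods (those with no proper subset among the neighborhoods, deduplicated by set equality), which is exactly the minimum size of a local base.
import Mathlib
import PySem

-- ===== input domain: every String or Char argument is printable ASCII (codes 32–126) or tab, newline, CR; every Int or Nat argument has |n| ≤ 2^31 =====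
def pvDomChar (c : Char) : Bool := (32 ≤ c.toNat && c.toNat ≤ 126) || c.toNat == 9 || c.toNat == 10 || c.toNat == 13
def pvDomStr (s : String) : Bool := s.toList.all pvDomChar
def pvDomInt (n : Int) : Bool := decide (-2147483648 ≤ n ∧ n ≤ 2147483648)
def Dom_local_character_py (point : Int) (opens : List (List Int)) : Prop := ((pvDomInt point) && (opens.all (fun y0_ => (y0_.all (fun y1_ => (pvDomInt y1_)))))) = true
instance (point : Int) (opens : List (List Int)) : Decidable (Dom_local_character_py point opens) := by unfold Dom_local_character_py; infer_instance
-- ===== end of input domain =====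

-- B replaces A's search over all families of every size by a direct count of the
-- distinct minimal neighborhoods (alternative algorithm, same return value).
-- Python sets are represented as lists of their elements; all set operations are by membership.

-- ===== PORT A =====
-- V.issubset(U) on lists-as-sets
def pvSubset (V U : List Int) : Bool := V.all (fun x => U.contains x)

-- the 'all(any(...))' condition of A's inner loop
def pvCovers (point : Int) (N : List (List Int)) (fam : List (List Int)) : Bool :=
  N.all (fun U => fam.any (fun V => V.contains point && pvSubset V U))

-- itertools.combinations(N, s) ported as List.sublistsLen s N (the length-s sublists of N;
-- A only asks whether ANY family of the given size covers, so enumeration order is immaterial)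
def local_character_py (point : Int) (opens : List (List Int)) : Int :=
  let N := opens.filter (fun U => U.contains point)
  if N.isEmpty then 0
  else
    match (PySem.List.pyRange 1 ((N.length : Int) + 1) 1).find?
        (fun s => (List.sublistsLen s.toNat N).any (fun fam => pvCovers point N fam)) with
    | some s => s
    | none => (N.length : Int)

-- ===== PORT B =====
-- V < U (proper subset) and V == U (set equality) on lists-as-sets
def pvProperSubset (V U : List Int) : Bool := pvSubset V U && !(pvSubset U V)
def pvSetEq (V U : List Int) : Bool := pvSubset V U && pvSubset U V

def local_character_py_alt (point : Int) (opens : List (List Int)) : Int :=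
  let N := opens.filter (fun U => U.contains point)
  ((N.foldl (fun acc U =>
      if N.any (fun V => pvProperSubset V U) then acc
      else if acc.any (fun W => pvSetEq W U) then acc
      else acc ++ [U]) []).length : Int)

-- ===== PRECONDITION & SPEC =====
def Spec_local_character_py (point : Int) (opens : List (List Int)) (out : Int) : Prop := out = local_character_py_alt point opens
instance (point : Int) (opens : List (List Int)) (out : Int) : Decidable (Spec_local_character_py point opens out) := by unfold Spec_local_character_py; infer_instance

-- ===== CLAIM (what is proved, stated in full; the proofs are below) =====
def Claim_equal_local_character_py : Prop := ∀ (point : Int) (opens : List (List Int)), Dom_local_character_py point opens → Spec_local_character_py point opens (local_character_py point opens)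

-- ===== LEMMAS AND PROOFS =====

theorem pvSubset_iff (V U : List Int) : pvSubset V U = true ↔ V.toFinset ⊆ U.toFinset := by
  simp [pvSubset, List.all_eq_true, Finset.subset_iff]

theorem pvSetEq_iff (V U : List Int) : pvSetEq V U = true ↔ V.toFinset = U.toFinset := by
  simp only [pvSetEq, Bool.and_eq_true, pvSubset_iff]
  constructor
  · exact fun ⟨h1, h2⟩ => le_antisymm h1 h2
  · exact fun h => ⟨h.le, h.ge⟩

theorem pvProperSubset_iff (V U : List Int) : pvProperSubset V U = true ↔ V.toFinset ⊂ U.toFinset := by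
  simp only [pvProperSubset, Bool.and_eq_true, Bool.not_eq_true', ← Bool.not_eq_true, pvSubset_iff]
  exact ⟨fun ⟨h1, h2⟩ => ⟨h1, h2⟩, fun h => ⟨h.1, h.2⟩⟩

-- the fold step of B
def pvStep (N : List (List Int)) (acc : List (List Int)) (U : List Int) : List (List Int) :=
  if N.any (fun V => pvProperSubset V U) then acc
  else if acc.any (fun W => pvSetEq W U) then acc
  else acc ++ [U]

-- "U is minimal among N"
def pvMinB (N : List (List Int)) (U : List Int) : Bool := !(N.any (fun V => pvProperSubset V U))

theorem pvStep_cases (N acc : List (List Int)) (U : List Int) :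
    ((N.any fun V => pvProperSubset V U) = true ∧ pvStep N acc U = acc) ∨
    ((N.any fun V => pvProperSubset V U) = false ∧ (acc.any fun W => pvSetEq W U) = true ∧ pvStep N acc U = acc) ∨
    ((N.any fun V => pvProperSubset V U) = false ∧ (acc.any fun W => pvSetEq W U) = false ∧ pvStep N acc U = acc ++ [U]) := by
  unfold pvStep
  by_cases h1 : (N.any fun V => pvProperSubset V U) = true
  · exact Or.inl ⟨h1, by simp [h1]⟩
  · by_cases h2 : (acc.any fun W => pvSetEq W U) = true
    · exact Or.inr (Or.inl ⟨by simpa using h1, h2, by simp [h1, h2]⟩)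
    · exact Or.inr (Or.inr ⟨by simpa using h1, by simpa using h2, by simp [h1, h2]⟩)

theorem foldl_step_prefix (N : List (List Int)) (xs acc : List (List Int)) :
    ∃ t, List.foldl (pvStep N) acc xs = acc ++ t ∧ t.Sublist xs := by
  induction xs generalizing acc with
  | nil => exact ⟨[], by simp⟩
  | cons U xs ih =>
    simp only [List.foldl_cons]
    rcases pvStep_cases N acc U with ⟨h1, hst⟩ | ⟨h1, h2, hst⟩ | ⟨h1, h2, hst⟩ <;> rw [hst]
    · obtain ⟨t, ht, hs⟩ := ih acc
      exact ⟨t, ht, hs.cons U⟩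
    · obtain ⟨t, ht, hs⟩ := ih acc
      exact ⟨t, ht, hs.cons U⟩
    · obtain ⟨t, ht, hs⟩ := ih (acc ++ [U])
      exact ⟨U :: t, by simpa using ht, hs.cons₂ U⟩

theorem foldl_step_mem (N : List (List Int)) (xs acc : List (List Int)) (W : List Int)
    (hW : W ∈ List.foldl (pvStep N) acc xs) :
    W ∈ acc ∨ (W ∈ xs ∧ pvMinB N W = true) := by
  induction xs generalizing acc with
  | nil => simp at hW; exact Or.inl hW
  | cons U xs ih =>
    simp only [List.foldl_cons] at hW
    unfold pvStep at hW
    split_ifs at hW with h1 h2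
    · rcases ih acc hW with h | h
      · exact Or.inl h
      · exact Or.inr ⟨List.mem_cons_of_mem _ h.1, h.2⟩
    · rcases ih acc hW with h | h
      · exact Or.inl h
      · exact Or.inr ⟨List.mem_cons_of_mem _ h.1, h.2⟩
    · rcases ih (acc ++ [U]) hW with h | h
      · rcases List.mem_append.mp h with h | h
        · exact Or.inl h
        · simp at h; subst h
          exact Or.inr ⟨List.mem_cons_self, by simp [pvMinB, h1]⟩
      · exact Or.inr ⟨List.mem_cons_of_mem _ h.1, h.2⟩

theorem foldl_step_image (N : List (List Int)) (xs acc : List (List Int)) (a : Finset Int) :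
    (a ∈ (List.foldl (pvStep N) acc xs).map List.toFinset) ↔
      a ∈ acc.map List.toFinset ∨ ∃ U ∈ xs, pvMinB N U = true ∧ U.toFinset = a := by
  induction xs generalizing acc with
  | nil => simp
  | cons U xs ih =>
    simp only [List.foldl_cons]
    rcases pvStep_cases N acc U with ⟨h1, hst⟩ | ⟨h1, h2, hst⟩ | ⟨h1, h2, hst⟩ <;> rw [hst]
    · rw [ih]
      constructor
      · rintro (h | ⟨V, hV, hm, he⟩)
        · exact Or.inl h
        · exact Or.inr ⟨V, List.mem_cons_of_mem _ hV, hm, he⟩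
      · rintro (h | ⟨V, hV, hm, he⟩)
        · exact Or.inl h
        · rcases List.mem_cons.mp hV with rfl | hV
          · simp [pvMinB, h1] at hm
          · exact Or.inr ⟨V, hV, hm, he⟩
    · rw [ih]
      constructor
      · rintro (h | ⟨V, hV, hm, he⟩)
        · exact Or.inl h
        · exact Or.inr ⟨V, List.mem_cons_of_mem _ hV, hm, he⟩
      · rintro (h | ⟨V, hV, hm, he⟩)
        · exact Or.inl h
        · rcases List.mem_cons.mp hV with rfl | hV
          · -- V = U, and U's class is already in acc
            simp only [List.any_eq_true] at h2
            obtain ⟨W, hWacc, hWe⟩ := h2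
            refine Or.inl ?_
            rw [List.mem_map]
            exact ⟨W, hWacc, by rw [(pvSetEq_iff W V).mp hWe]; exact he⟩
          · exact Or.inr ⟨V, hV, hm, he⟩
    · rw [ih]
      simp only [List.map_append, List.map_cons, List.map_nil, List.mem_append,
        List.mem_cons, List.not_mem_nil, or_false]
      constructor
      · rintro ((h | h) | ⟨V, hV, hm, he⟩)
        · exact Or.inl h
        · exact Or.inr ⟨U, Or.inl rfl, by simp [pvMinB, h1], h.symm⟩
        · exact Or.inr ⟨V, Or.inr hV, hm, he⟩
      · rintro (h | ⟨V, hV, hm, he⟩)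
        · exact Or.inl (Or.inl h)
        · rcases hV with rfl | hV
          · exact Or.inl (Or.inr he.symm)
          · exact Or.inr ⟨V, hV, hm, he⟩

theorem foldl_step_nodup (N : List (List Int)) (xs acc : List (List Int))
    (h : (acc.map List.toFinset).Nodup) :
    ((List.foldl (pvStep N) acc xs).map List.toFinset).Nodup := by
  induction xs generalizing acc with
  | nil => simpa using h
  | cons U xs ih =>
    simp only [List.foldl_cons]
    rcases pvStep_cases N acc U with ⟨h1, hst⟩ | ⟨h1, h2, hst⟩ | ⟨h1, h2, hst⟩ <;> rw [hst]
    · exact ih acc h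
    · exact ih acc h
    · refine ih (acc ++ [U]) ?_
      simp only [List.map_append, List.map_cons, List.map_nil]
      rw [List.nodup_append]
      refine ⟨h, List.nodup_singleton _, ?_⟩
      intro a ha b hb hab
      rw [List.mem_singleton] at hb
      subst hb; subst hab
      rw [List.mem_map] at ha
      obtain ⟨W, hWacc, hWe⟩ := ha
      exact (by simp [h2] : ¬ (acc.any fun W => pvSetEq W U) = true)
        (List.any_eq_true.mpr ⟨W, hWacc, (pvSetEq_iff W U).mpr hWe⟩)

-- M = the list B accumulates: first representatives of the distinct minimal classes
def pvM (N : List (List Int)) : List (List Int) := List.foldl (pvStep N) [] N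

theorem pvM_sublist (N : List (List Int)) : (pvM N).Sublist N := by
  obtain ⟨t, ht, hs⟩ := foldl_step_prefix N N []
  simpa [pvM, ht] using hs

theorem pvM_mem (N : List (List Int)) (W : List Int) (h : W ∈ pvM N) :
    W ∈ N ∧ pvMinB N W = true := by
  rcases foldl_step_mem N N [] W h with h | h
  · simp at h
  · exact h

theorem pvM_image (N : List (List Int)) (a : Finset Int) :
    a ∈ (pvM N).map List.toFinset ↔ ∃ U ∈ N, pvMinB N U = true ∧ U.toFinset = a := by
  rw [pvM, foldl_step_image]; simp

theorem pvM_nodup (N : List (List Int)) : ((pvM N).map List.toFinset).Nodup :=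
  foldl_step_nodup N N [] (by simp)

theorem pvM_below (N : List (List Int)) : ∀ (n : Nat) (U : List Int), U ∈ N → U.toFinset.card ≤ n →
    ∃ W ∈ pvM N, W.toFinset ⊆ U.toFinset := by
  intro n
  induction n using Nat.strong_induction_on with
  | _ n ih =>
    intro U hU hcard
    rcases Bool.eq_false_or_eq_true (N.any fun V => pvProperSubset V U) with hx | hx
    · -- some proper subset of U in N: descend
      obtain ⟨V, hVN, hVU⟩ := List.any_eq_true.mp hx
      have hss := (pvProperSubset_iff V U).mp hVU
      have hlt : V.toFinset.card < U.toFinset.card := Finset.card_lt_card hss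
      obtain ⟨W, hW, hsub⟩ := ih V.toFinset.card (by omega) V hVN le_rfl
      exact ⟨W, hW, hsub.trans hss.subset⟩
    · -- U minimal: its class has a representative in M
      have : U.toFinset ∈ (pvM N).map List.toFinset :=
        (pvM_image N _).mpr ⟨U, hU, by simp [pvMinB, hx], rfl⟩
      rw [List.mem_map] at this
      obtain ⟨W, hW, he⟩ := this
      exact ⟨W, hW, he ▸ Finset.Subset.refl _⟩

theorem covers_iff (point : Int) (N fam : List (List Int)) :
    pvCovers point N fam = true ↔
      ∀ U ∈ N, ∃ V ∈ fam, V.contains point = true ∧ V.toFinset ⊆ U.toFinset := by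
  simp only [pvCovers, List.all_eq_true, List.any_eq_true, Bool.and_eq_true, pvSubset_iff]

theorem cover_lower (point : Int) (N fam : List (List Int)) (hfam : fam.Sublist N)
    (hcov : pvCovers point N fam = true) : (pvM N).length ≤ fam.length := by
  have h1 : (pvM N).length = ((pvM N).map List.toFinset).toFinset.card := by
    rw [List.toFinset_card_of_nodup (pvM_nodup N), List.length_map]
  have hsub : ((pvM N).map List.toFinset).toFinset ⊆ (fam.map List.toFinset).toFinset := by
    intro a ha
    rw [List.mem_toFinset, List.mem_map] at ha
    obtain ⟨W, hWM, rfl⟩ := ha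
    obtain ⟨hWN, hWmin⟩ := pvM_mem N W hWM
    obtain ⟨V, hVfam, hVpt, hVsub⟩ := (covers_iff point N fam).mp hcov W hWN
    have hVN : V ∈ N := hfam.subset hVfam
    have hnss : ¬ V.toFinset ⊂ W.toFinset := by
      intro hss
      have : (N.any fun X => pvProperSubset X W) = true :=
        List.any_eq_true.mpr ⟨V, hVN, (pvProperSubset_iff V W).mpr hss⟩
      simp [pvMinB, this] at hWmin
    have heq : V.toFinset = W.toFinset := by
      by_contra hne
      exact hnss (HasSubset.Subset.ssubset_of_ne hVsub hne)
    rw [List.mem_toFinset, List.mem_map]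
    exact ⟨V, hVfam, heq⟩
  calc (pvM N).length = ((pvM N).map List.toFinset).toFinset.card := h1
    _ ≤ (fam.map List.toFinset).toFinset.card := Finset.card_le_card hsub
    _ ≤ (fam.map List.toFinset).length := List.toFinset_card_le _
    _ = fam.length := by simp

theorem covers_pvM (point : Int) (N : List (List Int))
    (hpt : ∀ U ∈ N, U.contains point = true) : pvCovers point N (pvM N) = true := by
  rw [covers_iff]
  intro U hU
  obtain ⟨W, hWM, hWsub⟩ := pvM_below N U.toFinset.card U hU le_rfl
  exact ⟨W, hWM, hpt W (pvM_mem N W hWM).1, hWsub⟩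

theorem sublist_extend {α : Type} (N : List α) : ∀ (M : List α) (s : Nat), M.Sublist N →
    M.length ≤ s → s ≤ N.length → ∃ fam, M.Sublist fam ∧ fam.Sublist N ∧ fam.length = s := by
  induction N with
  | nil =>
    intro M s h h1 h2
    have hM : M = [] := List.sublist_nil.mp h
    have hs : s = 0 := by simpa using h2
    exact ⟨[], by simp [hM], List.Sublist.refl _, by simp [hs]⟩
  | cons U N ih =>
    intro M s h h1 h2
    cases h with
    | cons _ h' =>
      by_cases hs : s ≤ N.length
      · obtain ⟨fam, a, b, c⟩ := ih M s h' h1 hs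
        exact ⟨fam, a, b.cons U, c⟩
      · have hs' : s = N.length + 1 := by simp at h2; omega
        obtain ⟨fam, a, b, c⟩ := ih M N.length h' h'.length_le le_rfl
        exact ⟨U :: fam, a.cons U, b.cons₂ U, by simp [c, hs']⟩
    | cons₂ _ h' =>
      cases s with
      | zero => simp at h1
      | succ s' =>
        obtain ⟨fam, a, b, c⟩ := ih _ s' h' (by simp at h1; omega) (by simp at h2; omega)
        exact ⟨U :: fam, a.cons₂ U, b.cons₂ U, by simp [c]⟩

theorem existsCover_iff (point : Int) (N : List (List Int))
    (hpt : ∀ U ∈ N, U.contains point = true) (s : Nat) :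
    (∃ fam, fam.Sublist N ∧ fam.length = s ∧ pvCovers point N fam = true) ↔
      ((pvM N).length ≤ s ∧ s ≤ N.length) := by
  constructor
  · rintro ⟨fam, hf, rfl, hc⟩
    exact ⟨cover_lower point N fam hf hc, hf.length_le⟩
  · rintro ⟨h1, h2⟩
    obtain ⟨fam, hMf, hfN, hlen⟩ := sublist_extend N (pvM N) s (pvM_sublist N) h1 h2
    refine ⟨fam, hfN, hlen, ?_⟩
    rw [covers_iff]
    intro U hU
    obtain ⟨V, hVM, h3, h4⟩ := (covers_iff point N (pvM N)).mp (covers_pvM point N hpt) U hU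
    exact ⟨V, hMf.subset hVM, h3, h4⟩

theorem find?_pyRange_first (p : Int → Bool) (m : Int) :
    ∀ (n : Nat) (a : Int), (m - a).toNat = n → a ≤ m → ∀ b, m < b →
    (∀ s, a ≤ s → s < b → (p s = true ↔ m ≤ s)) →
    (PySem.List.pyRange a b 1).find? p = some m := by
  intro n
  induction n with
  | zero =>
    intro a hn ham b hmb hp
    have ha : a = m := by omega
    subst ha
    rw [PySem.List.pyRange_one_cons (by omega)]
    rw [List.find?_cons_of_pos ((hp a le_rfl hmb).mpr le_rfl)]
  | succ n ih =>
    intro a hn ham b hmb hp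
    rw [PySem.List.pyRange_one_cons (by omega)]
    rw [List.find?_cons_of_neg (by
      intro hpa
      have := (hp a le_rfl (by omega)).mp hpa
      omega)]
    exact ih (a + 1) (by omega) (by omega) b hmb (fun s h1 h2 => hp s (by omega) h2)

-- ===== VERDICT (by name: the statement is the Claim_ definition above) =====
theorem local_character_py_spec : Claim_equal_local_character_py := by
  intro point opens _
  unfold Spec_local_character_py
  have halt : local_character_py_alt point opens =
      ((pvM (opens.filter fun U => U.contains point)).length : Int) := rfl
  rw [halt]
  unfold local_character_py
  set N := opens.filter (fun U => U.contains point) with hNdef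
  have hpt : ∀ U ∈ N, U.contains point = true := fun U hU => (List.mem_filter.mp hU).2
  by_cases hNe : N.isEmpty
  · have : N = [] := List.isEmpty_iff.mp hNe
    simp only [hNe, if_true]
    rw [this]
    rfl
  · have hne : N ≠ [] := fun h => hNe (by simp [h])
    have hm1 : 1 ≤ (pvM N).length := by
      obtain ⟨U, hU⟩ := List.exists_mem_of_ne_nil N hne
      obtain ⟨W, hWM, _⟩ := pvM_below N U.toFinset.card U hU le_rfl
      exact List.length_pos_of_mem hWM
    have hmlen : (pvM N).length ≤ N.length := (pvM_sublist N).length_le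
    rw [if_neg hNe]
    rw [find?_pyRange_first _ ((pvM N).length : Int) ((pvM N).length - 1) 1
      (by omega) (by omega) ((N.length : Int) + 1) (by omega) ?_]
    intro s hs1 hs2
    rw [List.any_eq_true]
    constructor
    · rintro ⟨fam, hfmem, hc⟩
      obtain ⟨hfsub, hflen⟩ := List.mem_sublistsLen.mp hfmem
      have := cover_lower point N fam hfsub hc
      omega
    · intro hms
      have hsN : (pvM N).length ≤ s.toNat ∧ s.toNat ≤ N.length := by omega
      obtain ⟨fam, hfN, hflen, hc⟩ := (existsCover_iff point N hpt s.toNat).mpr hsN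
      exact ⟨fam, List.mem_sublistsLen.mpr ⟨hfN, hflen⟩, hc⟩
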